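-- pv_equiv track=rewrite | github.com/pymeasure/pymeasure | pymeasure/instruments/rohdeschwarz/rohdeschwarz_sgt100a.py | _get_markerdata
-- ===== SOURCE A (Python) =====
-- def _get_markerdata(markers_list):
--     # Markers are integer from 1 to 4
--     data = []
--     for i, markers in enumerate(markers_list):
--         # Remove duplicates
--         markers = list(set(markers))
--         # Compute value
--         value = sum([1 << (i - 1) for i in markers])
--         assert(value <= 15)
--         if (i % 2):
--             value_byte |= value
--             data.append(value_byte)
--         else:
--             value_byte = (value << 4)
--
--     return data
-- ===== SOURCE B (Python) =====
-- def _get_markerdata(markers_list):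
--     # Pass 1: nibble value per marker set (assert still fires for a trailing unpaired element)
--     values = []
--     for markers in markers_list:
--         value = sum(1 << (m - 1) for m in set(markers))
--         assert value <= 15
--         values.append(value)
--     # Pass 2: pack consecutive nibble pairs into bytes
--     data = []
--     for j in range(0, len(values) - 1, 2):
--         data.append((values[j] << 4) | values[j + 1])
--     return data
-- ===== Notes on version B (the rewrite author's own statement) =====
-- stated objective: simpler
-- what changed: Replaces the single loop that threads a parity flag and a value_byte accumulator with two independent passes: map each marker set to its nibble value, then pack consecutive pairs of nibbles into bytes by stepping the index by 2.
import Mathlib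
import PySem

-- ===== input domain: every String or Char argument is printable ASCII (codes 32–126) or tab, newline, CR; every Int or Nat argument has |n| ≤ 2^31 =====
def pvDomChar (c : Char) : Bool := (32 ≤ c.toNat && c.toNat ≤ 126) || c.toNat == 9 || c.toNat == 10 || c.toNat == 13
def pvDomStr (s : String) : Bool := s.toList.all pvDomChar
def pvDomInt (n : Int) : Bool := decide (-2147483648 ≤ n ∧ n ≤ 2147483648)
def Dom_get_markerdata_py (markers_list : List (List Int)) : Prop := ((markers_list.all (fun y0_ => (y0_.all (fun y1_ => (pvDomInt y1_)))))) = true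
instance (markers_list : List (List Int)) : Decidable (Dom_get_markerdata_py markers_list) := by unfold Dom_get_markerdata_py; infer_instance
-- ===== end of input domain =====

-- B splits A's parity-threaded single loop into two passes: map to nibble values, then pack index pairs (same cost, simpler decomposition).


-- ===== PORT A =====
-- `sum([1 << (m - 1) for m in set(markers)])`; Python raises ValueError when m - 1 < 0,
-- which Pre_ excludes, so the 0 branch of the shift is unreachable under Pre_.
def nibble_value (markers : List Int) : Int :=
  ((PySem.Set.ofList markers).map (fun (i : Int) => if 0 ≤ i - 1 then (1 : Int) <<< (i - 1).toNat else 0)).sum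

def get_markerdata_py (markers_list : List (List Int)) : List Int :=
  -- data = [], value_byte unbound (modelled 0; first iteration has i = 0 and assigns it before any read)
  ((PySem.List.enumerate markers_list 0).foldl
    (fun (s : List Int × Int) (p : Int × List Int) =>
      let value := nibble_value p.2
      if PySem.Int.mod p.1 2 ≠ 0 then
        let vb := PySem.Int.bor s.2 value
        (s.1 ++ [vb], vb)
      else
        (s.1, value <<< (4 : Nat)))
    ([], 0)).1

-- ===== PORT B =====
def get_markerdata_py_alt (markers_list : List (List Int)) : List Int :=
  let values := markers_list.foldl (fun vs markers => vs ++ [nibble_value markers]) []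
  (PySem.List.pyRange 0 (PySem.List.len values - 1) 2).foldl
    (fun data j =>
      data ++ [PySem.Int.bor (PySem.List.pyGetD values j 0 <<< (4 : Nat)) (PySem.List.pyGetD values (j + 1) 0)])
    []

-- ===== PRECONDITION & SPEC =====
-- A raises outside this: ValueError (negative shift) for a marker < 1, AssertionError for a
-- marker > 4 (any such marker forces the nibble sum past 15).
def Pre_get_markerdata_py (markers_list : List (List Int)) : Prop :=
  ∀ ms ∈ markers_list, ∀ m ∈ ms, 1 ≤ m ∧ m ≤ 4
instance (markers_list : List (List Int)) : Decidable (Pre_get_markerdata_py markers_list) := by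
  unfold Pre_get_markerdata_py; infer_instance
def pvWitness_get_markerdata_py : List (List Int) := [[1, 2], [3, 3, 4], [2]]

def Spec_get_markerdata_py (markers_list : List (List Int)) (out : List Int) : Prop := out = get_markerdata_py_alt markers_list
instance (markers_list : List (List Int)) (out : List Int) : Decidable (Spec_get_markerdata_py markers_list out) := by unfold Spec_get_markerdata_py; infer_instance

-- ===== CLAIM (what is proved, stated in full; the proofs are below) =====
def Claim_equal_get_markerdata_py : Prop := ∀ (markers_list : List (List Int)), Dom_get_markerdata_py markers_list → Pre_get_markerdata_py markers_list → Spec_get_markerdata_py markers_list (get_markerdata_py markers_list)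

-- ===== LEMMAS AND PROOFS =====

-- the common value both programs compute: consecutive nibbles packed into bytes
def packPairs : List Int → List Int
  | a :: b :: t => PySem.Int.bor (a <<< (4 : Nat)) b :: packPairs t
  | _ => []

theorem aside_fold (k : Int) (hk : PySem.Int.mod k 2 = 0) (l : List (List Int))
    (acc : List Int) (vb : Int) :
    ((PySem.List.enumerate l k).foldl
      (fun (s : List Int × Int) (p : Int × List Int) =>
        let value := nibble_value p.2
        if PySem.Int.mod p.1 2 ≠ 0 then
          let vb := PySem.Int.bor s.2 value
          (s.1 ++ [vb], vb)
        else
          (s.1, value <<< (4 : Nat)))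
      (acc, vb)).1 = acc ++ packPairs (l.map nibble_value) := by
  match l with
  | [] => simp [PySem.List.enumerate, packPairs]
  | [a] =>
    have hk' : k % 2 = 0 := by rw [← PySem.Int.mod_eq_emod_of_pos (by omega : (0:Int) < 2)]; exact hk
    simp [PySem.List.enumerate, packPairs, hk']
  | a :: b :: t =>
    have h2 : (0:Int) < 2 := by omega
    rw [PySem.Int.mod_eq_emod_of_pos h2] at hk
    have hk1 : PySem.Int.mod (k + 1) 2 ≠ 0 := by
      rw [PySem.Int.mod_eq_emod_of_pos h2]; omega
    have hk2 : PySem.Int.mod (k + 2) 2 = 0 := by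
      rw [PySem.Int.mod_eq_emod_of_pos h2]; omega
    have hknz : ¬ PySem.Int.mod k 2 ≠ 0 := by
      rw [PySem.Int.mod_eq_emod_of_pos h2]; omega
    simp only [PySem.List.enumerate, List.foldl_cons, List.map_cons, packPairs]
    rw [if_neg hknz, if_pos hk1]
    have := aside_fold (k + 1 + 1) (by rw [show k+1+1 = k+2 by ring]; exact hk2) t
      (acc ++ [PySem.Int.bor (nibble_value a <<< (4 : Nat)) (nibble_value b)])
      (PySem.Int.bor (nibble_value a <<< (4 : Nat)) (nibble_value b))
    simp only at this ⊢
    rw [this]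
    simp
termination_by l.length

theorem bside_map (vs : List Int) :
    (PySem.List.pyRange 0 (PySem.List.len vs - 1) 2).map
      (fun j => PySem.Int.bor (PySem.List.pyGetD vs j 0 <<< (4 : Nat)) (PySem.List.pyGetD vs (j + 1) 0))
      = packPairs vs := by
  match vs with
  | [] => simp [PySem.List.pyRange, packPairs, PySem.List.len]
  | [a] => simp [PySem.List.pyRange, packPairs, PySem.List.len]
  | a :: b :: t =>
    have ih := bside_map t
    have hn : PySem.List.len (a :: b :: t) - 1 = (PySem.List.len t : Int) + 1 := by
      simp only [PySem.List.len, List.length_cons]; push_cast; ring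
    rw [hn]
    set n : Int := PySem.List.len t with hnd
    have hn0 : n = (t.length : Int) := by simp [hnd, PySem.List.len]
    rw [PySem.List.pyRange_of_pos 0 (n + 1) (by omega)]
    rw [PySem.List.pyRange_of_pos 0 (n - 1) (by omega)] at ih
    by_cases ht : 0 < n + 1
    · have hcount : (if (0:Int) < n + 1 then ((n + 1 - 0 + 2 - 1) / 2).toNat else 0)
          = Nat.succ (if (0:Int) < n - 1 then ((n - 1 - 0 + 2 - 1) / 2).toNat else 0) := by
        by_cases h1 : (0:Int) < n - 1
        · simp only [if_pos ht, if_pos h1]; omega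
        · simp only [if_pos ht, if_neg h1]
          have : n = 0 ∨ n = 1 := by omega
          rcases this with h | h <;> simp [h]
      rw [hcount, List.range_succ_eq_map]
      simp only [List.map_cons, List.map_map]
      rw [show packPairs (a :: b :: t) = PySem.Int.bor (a <<< (4 : Nat)) b :: packPairs t from rfl,
        ← ih, List.map_map]
      congr 1
      · norm_num [PySem.List.pyGetD_zero_cons]
        have e : (1 : Int) = ((1 : Nat) : Int) := rfl
        rw [e, PySem.List.pyGetD_natCast]
        simp [List.getD]
      · apply List.map_congr_left
        intro k _
        simp only [Function.comp]
        have e1 : (0:Int) + 2 * ↑(k + 1) = ((2 * k + 2 : Nat) : Int) := by push_cast; ring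
        have e2 : ((2 * k + 2 : Nat) : Int) + 1 = ((2 * k + 3 : Nat) : Int) := by push_cast; ring
        have e3 : (0:Int) + 2 * (k:Int) = ((2 * k : Nat) : Int) := by push_cast; ring
        have e4 : ((2 * k : Nat) : Int) + 1 = ((2 * k + 1 : Nat) : Int) := by push_cast; ring
        rw [e1, e2, e3, e4, PySem.List.pyGetD_natCast, PySem.List.pyGetD_natCast,
          PySem.List.pyGetD_natCast, PySem.List.pyGetD_natCast]
        simp [List.getD]
    · exfalso; omega
termination_by vs.length

-- ===== VERDICT (by name: the statement is the Claim_ definition above) =====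
theorem get_markerdata_py_spec : Claim_equal_get_markerdata_py := by
  intro l _ _
  unfold Spec_get_markerdata_py get_markerdata_py get_markerdata_py_alt
  rw [aside_fold 0 (by decide) l [] 0]
  rw [PySem.List.foldl_append_singleton_eq_map]
  rw [PySem.List.foldl_append_singleton_eq_map]
  simp only [List.nil_append]
  rw [bside_map]
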